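-- pv_equiv track=rewrite | github.com/GitRiyaJana/Light_weight_cryptography | higher_order_gimli/higher_order2.py | higher_order_derivative
-- ===== SOURCE A (Python) =====
-- import itertools
--
-- def gimli_encrypt(state, rounds=4):
--     # state = (x[4], y[4], z[4])
--     # Put your cipher here. This is a placeholder identity map.
--     x, y, z = state
--     return x[:], y[:], z[:]
--
-- def apply_diff(state, diffs):
--     (x, y, z) = state
--     x = x[:] ; y = y[:] ; z = z[:]
--     for (layer, idx, val) in diffs:
--         if layer == 'x': x[idx] ^= val
--         if layer == 'y': y[idx] ^= val
--         if layer == 'z': z[idx] ^= val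
--     return (x, y, z)
--
-- def higher_order_derivative(state, target, diffs, rounds=4):
--     layer, pos = target
--     xor_sum = 0
--
--     # For all subsets of the difference vectors
--     for r in range(len(diffs) + 1):
--         for subset in itertools.combinations(diffs, r):
--             st = apply_diff(state, subset)
--             x, y, z = gimli_encrypt(st, rounds)
--
--             # sign = parity of subset
--             if (r % 2) == 1:
--                 sign = 1
--             else:
--                 sign = 0
--
--             val = {
--                 'x': x[pos],
--                 'y': y[pos],
--                 'z': z[pos],
--             }[layer]
--
--             if sign == 1:
--                 xor_sum ^= val
--
--     return xor_sum
-- ===== SOURCE B (Python) =====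
-- def gimli_encrypt(state, rounds=4):
--     # state = (x[4], y[4], z[4])
--     # Put your cipher here. This is a placeholder identity map.
--     x, y, z = state
--     return x[:], y[:], z[:]
--
-- def higher_order_derivative(state, target, diffs, rounds=4):
--     layer, pos = target
--     # Iterative doubling: a table of (state, parity) entries; each diff
--     # doubles the table by XOR-applying that diff to a copy of every entry.
--     x, y, z = state
--     table = [((x[:], y[:], z[:]), 0)]
--     for (dl, idx, val) in diffs:
--         new_entries = []
--         for (s, p) in table:
--             sx, sy, sz = s
--             sx = sx[:]; sy = sy[:]; sz = sz[:]
--             if dl == 'x': sx[idx] ^= val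
--             if dl == 'y': sy[idx] ^= val
--             if dl == 'z': sz[idx] ^= val
--             new_entries.append(((sx, sy, sz), p ^ 1))
--         table += new_entries
--     xor_sum = 0
--     for (s, p) in table:
--         ex, ey, ez = gimli_encrypt(s, rounds)
--         v = {'x': ex, 'y': ey, 'z': ez}[layer][pos]
--         if p == 1:
--             xor_sum ^= v
--     return xor_sum
-- ===== Notes on version B (the rewrite author's own statement) =====
-- stated objective: faster
-- what changed: Replaces the per-size itertools.combinations enumeration (which re-applies every diff of every subset from scratch) by iterative doubling of a (state, parity) table, one single-diff application per subset, then one XOR pass over the odd-parity entries.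
import Mathlib
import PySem

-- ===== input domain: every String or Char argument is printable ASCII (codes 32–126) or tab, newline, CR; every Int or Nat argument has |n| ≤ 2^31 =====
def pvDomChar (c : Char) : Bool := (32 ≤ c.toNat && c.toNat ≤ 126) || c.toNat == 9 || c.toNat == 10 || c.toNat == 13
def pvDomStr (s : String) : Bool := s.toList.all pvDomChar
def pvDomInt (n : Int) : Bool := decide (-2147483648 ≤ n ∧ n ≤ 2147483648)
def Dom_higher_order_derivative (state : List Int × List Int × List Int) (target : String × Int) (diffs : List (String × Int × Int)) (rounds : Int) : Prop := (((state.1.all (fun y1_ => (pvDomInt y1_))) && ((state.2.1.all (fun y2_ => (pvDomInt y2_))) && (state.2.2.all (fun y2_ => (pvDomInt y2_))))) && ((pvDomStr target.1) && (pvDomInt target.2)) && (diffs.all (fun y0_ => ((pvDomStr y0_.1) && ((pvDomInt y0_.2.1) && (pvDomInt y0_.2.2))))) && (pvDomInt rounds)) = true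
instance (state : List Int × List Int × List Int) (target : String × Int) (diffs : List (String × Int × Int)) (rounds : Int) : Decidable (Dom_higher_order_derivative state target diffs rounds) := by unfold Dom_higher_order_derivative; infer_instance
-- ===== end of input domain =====

-- B replaces A's per-size combinations enumeration by iterative doubling of a
-- (state, parity) table (one single-diff application per subset); equal return value on Pre_.


-- ===== PORT A =====
-- gimli_encrypt: the placeholder identity map (the list copies x[:] are identities on Lean lists)
def pvGimliEncrypt (state : List Int × List Int × List Int) (rounds : Int) : List Int × List Int × List Int :=
  (state.1, state.2.1, state.2.2)

-- one iteration of apply_diff's loop (= Source B's apply_one): the three sequential ifs;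
-- x[idx] ^= val is pySetD/pyGetD (total forms; the out-of-range IndexError is excluded by Pre_)
def pvApplyOne (s : List Int × List Int × List Int) (d : String × Int × Int) : List Int × List Int × List Int :=
  let x := if d.1 = "x" then PySem.List.pySetD s.1 d.2.1 (PySem.Int.bxor (PySem.List.pyGetD s.1 d.2.1 0) d.2.2) else s.1
  let y := if d.1 = "y" then PySem.List.pySetD s.2.1 d.2.1 (PySem.Int.bxor (PySem.List.pyGetD s.2.1 d.2.1 0) d.2.2) else s.2.1
  let z := if d.1 = "z" then PySem.List.pySetD s.2.2 d.2.1 (PySem.Int.bxor (PySem.List.pyGetD s.2.2 d.2.1 0) d.2.2) else s.2.2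
  (x, y, z)

-- apply_diff: fold the loop body over the diffs
def pvApplyDiff (state : List Int × List Int × List Int) (diffs : List (String × Int × Int)) : List Int × List Int × List Int :=
  diffs.foldl pvApplyOne state

-- itertools.combinations(l, r), in Python's emission order
def pvComb (r : Nat) (l : List (String × Int × Int)) : List (List (String × Int × Int)) :=
  match r, l with
  | 0, _ => [[]]
  | _ + 1, [] => []
  | r + 1, a :: l => (pvComb r l).map (fun S => a :: S) ++ pvComb (r + 1) l

-- the dict literal {'x': x[pos], 'y': y[pos], 'z': z[pos]}[layer]
-- (the KeyError for a layer outside {'x','y','z'}, and the IndexError from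
-- evaluating x[pos], y[pos], z[pos], are excluded by Pre_)
def pvSelect (layer : String) (pos : Int) (s : List Int × List Int × List Int) : Int :=
  if layer = "x" then PySem.List.pyGetD s.1 pos 0
  else if layer = "y" then PySem.List.pyGetD s.2.1 pos 0
  else PySem.List.pyGetD s.2.2 pos 0

def higher_order_derivative (state : List Int × List Int × List Int) (target : String × Int) (diffs : List (String × Int × Int)) (rounds : Int) : Int :=
  let layer := target.1
  let pos := target.2
  (List.range (diffs.length + 1)).foldl (fun xor_sum r =>
    (pvComb r diffs).foldl (fun xor_sum subset =>
      let st := pvApplyDiff state subset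
      let enc := pvGimliEncrypt st rounds
      let sign : Int := if r % 2 = 1 then 1 else 0
      let val := pvSelect layer pos enc
      if sign = 1 then PySem.Int.bxor xor_sum val else xor_sum) xor_sum) 0

-- ===== PORT B =====
def higher_order_derivative_alt (state : List Int × List Int × List Int) (target : String × Int) (diffs : List (String × Int × Int)) (rounds : Int) : Int :=
  let layer := target.1
  let pos := target.2
  -- iterative doubling of the (state, parity) table
  let table : List ((List Int × List Int × List Int) × Int) :=
    diffs.foldl (fun table d =>
      table ++ table.map (fun e => (pvApplyOne e.1 d, PySem.Int.bxor e.2 1)))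
      [((state.1, state.2.1, state.2.2), 0)]
  table.foldl (fun xor_sum e =>
    let enc := pvGimliEncrypt e.1 rounds
    let val := pvSelect layer pos enc
    if e.2 = 1 then PySem.Int.bxor xor_sum val else xor_sum) 0

-- ===== PRECONDITION & SPEC =====
-- Pre_ excludes exactly the inputs where Python A raises: a KeyError when the target
-- layer is not 'x'/'y'/'z', and IndexErrors when the target position is out of range
-- for any of the three layers (the dict literal evaluates all three) or a diff's index
-- is out of range for the layer it names.
def Pre_higher_order_derivative (state : List Int × List Int × List Int) (target : String × Int) (diffs : List (String × Int × Int)) (rounds : Int) : Prop :=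
  (target.1 = "x" ∨ target.1 = "y" ∨ target.1 = "z") ∧
  PySem.Raise.InRange state.1.length target.2 ∧
  PySem.Raise.InRange state.2.1.length target.2 ∧
  PySem.Raise.InRange state.2.2.length target.2 ∧
  ∀ d ∈ diffs,
    (d.1 = "x" → PySem.Raise.InRange state.1.length d.2.1) ∧
    (d.1 = "y" → PySem.Raise.InRange state.2.1.length d.2.1) ∧
    (d.1 = "z" → PySem.Raise.InRange state.2.2.length d.2.1)
instance (state : List Int × List Int × List Int) (target : String × Int) (diffs : List (String × Int × Int)) (rounds : Int) : Decidable (Pre_higher_order_derivative state target diffs rounds) := by unfold Pre_higher_order_derivative; infer_instance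

def pvWitness_higher_order_derivative : (List Int × List Int × List Int) × (String × Int) × (List (String × Int × Int)) × Int :=
  (([1, 2], [3, 4], [5, 6]), ("x", 0), [("x", 1, 7), ("z", 0, 9)], 4)

def Spec_higher_order_derivative (state : List Int × List Int × List Int) (target : String × Int) (diffs : List (String × Int × Int)) (rounds : Int) (out : Int) : Prop := out = higher_order_derivative_alt state target diffs rounds
instance (state : List Int × List Int × List Int) (target : String × Int) (diffs : List (String × Int × Int)) (rounds : Int) (out : Int) : Decidable (Spec_higher_order_derivative state target diffs rounds out) := by unfold Spec_higher_order_derivative; infer_instance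

-- ===== CLAIM (what is proved, stated in full; the proofs are below) =====
def Claim_equal_higher_order_derivative : Prop := ∀ (state : List Int × List Int × List Int) (target : String × Int) (diffs : List (String × Int × Int)) (rounds : Int), Dom_higher_order_derivative state target diffs rounds → Pre_higher_order_derivative state target diffs rounds → Spec_higher_order_derivative state target diffs rounds (higher_order_derivative state target diffs rounds)

-- ===== LEMMAS AND PROOFS =====

theorem pv_bxor_ofNat_ofNat (m n : Nat) : PySem.Int.bxor (Int.ofNat m) (Int.ofNat n) = Int.ofNat (m ^^^ n) := by
  simp [PySem.Int.bxor]

theorem pv_bxor_ofNat_negSucc (m n : Nat) : PySem.Int.bxor (Int.ofNat m) (Int.negSucc n) = Int.negSucc (m ^^^ n) := by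
  have h1 : (0 : Int) ≤ Int.ofNat m := Int.natCast_nonneg m
  have h2 : ¬ (0 : Int) ≤ Int.negSucc n := by rw [Int.negSucc_eq]; omega
  simp only [PySem.Int.bxor, if_pos h1, if_neg h2]
  have h3 : (-(Int.negSucc n) - 1).toNat = n := by omega
  have h4 : (Int.ofNat m).toNat = m := rfl
  rw [h3, h4, Int.negSucc_eq]
  omega

theorem pv_bxor_negSucc_ofNat (m n : Nat) : PySem.Int.bxor (Int.negSucc m) (Int.ofNat n) = Int.negSucc (m ^^^ n) := by
  have h1 : ¬ (0 : Int) ≤ Int.negSucc m := by rw [Int.negSucc_eq]; omega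
  have h2 : (0 : Int) ≤ Int.ofNat n := Int.natCast_nonneg n
  simp only [PySem.Int.bxor, if_neg h1, if_pos h2]
  have h3 : (-(Int.negSucc m) - 1).toNat = m := by omega
  have h4 : (Int.ofNat n).toNat = n := rfl
  rw [h3, h4, Int.negSucc_eq]
  omega

theorem pv_bxor_negSucc_negSucc (m n : Nat) : PySem.Int.bxor (Int.negSucc m) (Int.negSucc n) = Int.ofNat (m ^^^ n) := by
  have h1 : ¬ (0 : Int) ≤ Int.negSucc m := by rw [Int.negSucc_eq]; omega
  have h2 : ¬ (0 : Int) ≤ Int.negSucc n := by rw [Int.negSucc_eq]; omega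
  simp only [PySem.Int.bxor, if_neg h1, if_neg h2]
  have h3 : (-(Int.negSucc m) - 1).toNat = m := by omega
  have h4 : (-(Int.negSucc n) - 1).toNat = n := by omega
  rw [h3, h4]
  rfl

theorem pv_bxor_assoc (a b c : Int) : PySem.Int.bxor (PySem.Int.bxor a b) c = PySem.Int.bxor a (PySem.Int.bxor b c) := by
  rcases a with m | m <;> rcases b with n | n <;> rcases c with k | k <;>
    simp only [pv_bxor_ofNat_ofNat, pv_bxor_ofNat_negSucc, pv_bxor_negSucc_ofNat,
      pv_bxor_negSucc_negSucc, Nat.xor_assoc]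

theorem pv_zero_bxor (a : Int) : PySem.Int.bxor 0 a = a := by
  rw [PySem.Int.bxor_comm]; simp

-- XOR of a list of ints, as both ports accumulate it
def pvXorL (l : List Int) : Int := l.foldl PySem.Int.bxor 0

theorem pv_foldl_bxor_eq (l : List Int) : ∀ a : Int, l.foldl PySem.Int.bxor a = PySem.Int.bxor a (pvXorL l) := by
  induction l with
  | nil => intro a; simp [pvXorL]
  | cons x l ih =>
    intro a
    rw [List.foldl_cons, ih]
    have hx : pvXorL (x :: l) = PySem.Int.bxor x (pvXorL l) := by
      show List.foldl PySem.Int.bxor (PySem.Int.bxor 0 x) l = _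
      rw [ih, pv_zero_bxor]
    rw [hx, pv_bxor_assoc]

theorem pvXorL_cons (x : Int) (l : List Int) : pvXorL (x :: l) = PySem.Int.bxor x (pvXorL l) := by
  show List.foldl PySem.Int.bxor (PySem.Int.bxor 0 x) l = _
  rw [pv_foldl_bxor_eq, pv_zero_bxor]

theorem pvXorL_append (l1 l2 : List Int) : pvXorL (l1 ++ l2) = PySem.Int.bxor (pvXorL l1) (pvXorL l2) := by
  show (l1 ++ l2).foldl PySem.Int.bxor 0 = _
  rw [List.foldl_append, pv_foldl_bxor_eq]
  rfl

theorem pvXorL_perm {l1 l2 : List Int} (h : List.Perm l1 l2) : pvXorL l1 = pvXorL l2 := by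
  induction h with
  | nil => rfl
  | cons x _ ih => rw [pvXorL_cons, pvXorL_cons, ih]
  | swap x y l =>
    rw [pvXorL_cons, pvXorL_cons, pvXorL_cons, pvXorL_cons, ← pv_bxor_assoc, ← pv_bxor_assoc,
      PySem.Int.bxor_comm y x]
  | trans _ _ ih1 ih2 => rw [ih1, ih2]

theorem pvXorL_map_bxor {α : Type} (h1 h2 : α → Int) (l : List α) :
    pvXorL (l.map fun t => PySem.Int.bxor (h1 t) (h2 t)) =
      PySem.Int.bxor (pvXorL (l.map h1)) (pvXorL (l.map h2)) := by
  induction l with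
  | nil => simp [pvXorL]
  | cons x l ih =>
    simp only [List.map_cons, pvXorL_cons, ih]
    rw [pv_bxor_assoc, pv_bxor_assoc]
    congr 1
    rw [← pv_bxor_assoc, ← pv_bxor_assoc, PySem.Int.bxor_comm (h2 x)]

-- a fold accumulating conditional XORs is the XOR of the mapped list
theorem pv_foldl_if_bxor {α : Type} (P : α → Prop) [DecidablePred P] (g : α → Int) (l : List α) :
    ∀ a : Int, (l.foldl (fun acc t => if P t then PySem.Int.bxor acc (g t) else acc) a) =
      PySem.Int.bxor a (pvXorL (l.map fun t => if P t then g t else 0)) := by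
  induction l with
  | nil => intro a; simp [pvXorL]
  | cons x l ih =>
    intro a
    simp only [List.foldl_cons, List.map_cons, pvXorL_cons, ih]
    by_cases h : P x
    · simp only [if_pos h, pv_bxor_assoc]
    · simp only [if_neg h, pv_zero_bxor]

-- pointwise-equal fold bodies give equal folds
theorem pv_foldl_congr_mem {α β : Type} {l : List α} {f g : β → α → β}
    (h : ∀ (a : β) (x : α), x ∈ l → f a x = g a x) : ∀ a : β, l.foldl f a = l.foldl g a := by
  induction l with
  | nil => intro a; rfl
  | cons x l ih =>
    intro a
    rw [List.foldl_cons, List.foldl_cons, h a x (by simp)]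
    exact ih (fun a y hy => h a y (by simp [hy])) _

-- every member of pvComb r l has length r
theorem pvComb_length {r : Nat} {l : List (String × Int × Int)} {S : List (String × Int × Int)}
    (h : S ∈ pvComb r l) : S.length = r := by
  induction l generalizing r S with
  | nil =>
    cases r with
    | zero => simp [pvComb] at h; simp [h]
    | succ r => simp [pvComb] at h
  | cons a l ih =>
    cases r with
    | zero => simp [pvComb] at h; simp [h]
    | succ r =>
      simp only [pvComb, List.mem_append, List.mem_map] at h
      rcases h with ⟨T, hT, rfl⟩ | h
      · simp [ih hT]
      · exact ih h

-- pvComb is Python's combinations order; it is a permutation of Mathlib's sublistsLen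
theorem pvComb_perm (r : Nat) (l : List (String × Int × Int)) : List.Perm (pvComb r l) (List.sublistsLen r l) := by
  induction l generalizing r with
  | nil =>
    cases r with
    | zero => simp [pvComb]
    | succ r => simp [pvComb]
  | cons a l ih =>
    cases r with
    | zero => simp [pvComb]
    | succ r =>
      simp only [pvComb, List.sublistsLen_succ_cons]
      exact List.perm_append_comm.trans (List.Perm.append (ih (r + 1)) ((ih r).map _))

-- all subsets, as A enumerates them (by size, then combinations order)
def pvAllSubs (l : List (String × Int × Int)) : List (List (String × Int × Int)) :=
  (List.range (l.length + 1)).flatMap fun r => pvComb r l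

theorem pv_flatMap_perm {α β : Type} (L : List α) (f g : α → List β) (h : ∀ x ∈ L, List.Perm (f x) (g x)) :
    List.Perm (L.flatMap f) (L.flatMap g) := by
  induction L with
  | nil => simp
  | cons x L ih =>
    simp only [List.flatMap_cons]
    exact (h x (by simp)).append (ih fun y hy => h y (by simp [hy]))

theorem pvAllSubs_perm (l : List (String × Int × Int)) : List.Perm (pvAllSubs l) (List.sublists' l) :=
  (pv_flatMap_perm _ _ _ fun r _ => pvComb_perm r l).trans (List.range_bind_sublistsLen_perm l)

-- foldl over a flatMap
theorem pv_foldl_flatMap {α β γ : Type} (L : List α) (g : α → List β) (f : γ → β → γ) :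
    ∀ a : γ, (L.flatMap g).foldl f a = L.foldl (fun acc x => (g x).foldl f acc) a := by
  induction L with
  | nil => intro a; rfl
  | cons x L ih => intro a; simp only [List.flatMap_cons, List.foldl_append, List.foldl_cons, ih]

-- the recursive specification both ports are reduced to: the XOR, over the subsets S of ds
-- for which |S| + b is odd, of f applied to the state with S XORed in
def pvD (f : List Int × List Int × List Int → Int) (s : List Int × List Int × List Int) :
    List (String × Int × Int) → Bool → Int
  | [], b => if b then f s else 0
  | d :: ds, b => PySem.Int.bxor (pvD f s ds b) (pvD f (pvApplyOne s d) ds (!b))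

theorem pv_parity_flip (n : Nat) (b : Bool) : (((n + 1) % 2 == 1) != b) = ((n % 2 == 1) != !b) := by
  rcases Nat.mod_two_eq_zero_or_one n with h | h
  · have h' : (n + 1) % 2 = 1 := by omega
    rw [h, h']; cases b <;> rfl
  · have h' : (n + 1) % 2 = 0 := by omega
    rw [h, h']; cases b <;> rfl

-- A-side main lemma: the XOR over sublists' equals the recursion pvD
theorem pvA_main (f : List Int × List Int × List Int → Int) (ds : List (String × Int × Int)) :
    ∀ (s : List Int × List Int × List Int) (b : Bool),
    pvXorL ((List.sublists' ds).map fun S =>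
        if ((S.length % 2 == 1) != b) = true then f (S.foldl pvApplyOne s) else 0) =
      pvD f s ds b := by
  induction ds with
  | nil =>
    intro s b
    cases b <;> simp [pvD, pvXorL, pv_zero_bxor]
  | cons d ds ih =>
    intro s b
    rw [List.sublists'_cons, List.map_append, pvXorL_append, List.map_map]
    have h2 : ((List.sublists' ds).map ((fun S =>
        if ((S.length % 2 == 1) != b) = true then f (S.foldl pvApplyOne s) else 0) ∘ (List.cons d))) =
        ((List.sublists' ds).map fun S =>
          if ((S.length % 2 == 1) != !b) = true then f (S.foldl pvApplyOne (pvApplyOne s d)) else 0) := by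
      apply List.map_congr_left
      intro S _
      simp only [Function.comp, List.length_cons, List.foldl_cons, pv_parity_flip]
    rw [h2, ih, ih, pvD]

-- B-side main lemma: processing the remaining diffs on a table W of {0,1}-parity entries
theorem pvB_main (f : List Int × List Int × List Int → Int) (ds : List (String × Int × Int)) :
    ∀ (W : List ((List Int × List Int × List Int) × Int)), (∀ e ∈ W, e.2 = 0 ∨ e.2 = 1) →
    (ds.foldl (fun table d => table ++ table.map fun e => (pvApplyOne e.1 d, PySem.Int.bxor e.2 1)) W).foldl
        (fun acc e => if e.2 = 1 then PySem.Int.bxor acc (f e.1) else acc) 0 =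
      pvXorL (W.map fun e => pvD f e.1 ds (e.2 == 1)) := by
  induction ds with
  | nil =>
    intro W hW
    rw [List.foldl_nil]
    rw [pv_foldl_if_bxor (fun e => e.2 = 1) (fun e => f e.1) W 0, pv_zero_bxor]
    congr 1
    apply List.map_congr_left
    intro e _
    by_cases h : e.2 = 1
    · simp [pvD, h]
    · have : (e.2 == 1) = false := by simpa using h
      simp [pvD, h, this]
  | cons d ds ih =>
    intro W hW
    simp only [List.foldl_cons]
    rw [ih (W ++ W.map fun e => (pvApplyOne e.1 d, PySem.Int.bxor e.2 1)) ?inv]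
    case inv =>
      intro e he
      rcases List.mem_append.1 he with h | h
      · exact hW e h
      · rcases List.mem_map.1 h with ⟨e', he', rfl⟩
        rcases hW e' he' with h | h
        · right; show PySem.Int.bxor e'.2 1 = 1; rw [h]; decide
        · left; show PySem.Int.bxor e'.2 1 = 0; rw [h]; decide
    rw [List.map_append, pvXorL_append, List.map_map]
    have h2 : (W.map ((fun e => pvD f e.1 ds (e.2 == 1)) ∘
        (fun e => (pvApplyOne e.1 d, PySem.Int.bxor e.2 1)))) =
        (W.map fun e => pvD f (pvApplyOne e.1 d) ds (!(e.2 == 1))) := by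
      apply List.map_congr_left
      intro e he
      rcases hW e he with h | h
      · rw [Function.comp_apply, h]
        congr 1
      · rw [Function.comp_apply, h]
        congr 1
    rw [h2, ← pvXorL_map_bxor]
    rfl

-- A's port equals pvD
theorem pvA_eq (state : List Int × List Int × List Int) (target : String × Int)
    (diffs : List (String × Int × Int)) (rounds : Int) :
    higher_order_derivative state target diffs rounds =
      pvD (fun s => pvSelect target.1 target.2 s) state diffs false := by
  have step1 : higher_order_derivative state target diffs rounds =
      (List.range (diffs.length + 1)).foldl (fun acc r =>
        (pvComb r diffs).foldl (fun acc S =>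
          if r % 2 = 1 then PySem.Int.bxor acc (pvSelect target.1 target.2 (pvApplyDiff state S))
          else acc) acc) 0 := by
    unfold higher_order_derivative
    refine pv_foldl_congr_mem (fun acc r _ => ?_) 0
    refine pv_foldl_congr_mem (fun acc S _ => ?_) acc
    by_cases h : r % 2 = 1 <;> simp [h, pvGimliEncrypt]
  have step2 : higher_order_derivative state target diffs rounds =
      (List.range (diffs.length + 1)).foldl (fun acc r =>
        (pvComb r diffs).foldl (fun acc S =>
          if S.length % 2 = 1 then PySem.Int.bxor acc (pvSelect target.1 target.2 (pvApplyDiff state S))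
          else acc) acc) 0 := by
    rw [step1]
    refine pv_foldl_congr_mem (fun acc r hr => ?_) 0
    refine pv_foldl_congr_mem (fun acc S hS => ?_) acc
    rw [pvComb_length hS]
  rw [step2, ← pv_foldl_flatMap (List.range (diffs.length + 1)) (fun r => pvComb r diffs)
    (fun acc S => if S.length % 2 = 1 then PySem.Int.bxor acc (pvSelect target.1 target.2 (pvApplyDiff state S)) else acc) 0]
  rw [pv_foldl_if_bxor (fun S => S.length % 2 = 1)
    (fun S => pvSelect target.1 target.2 (pvApplyDiff state S)) _ 0, pv_zero_bxor]
  rw [show (List.flatMap (fun r => pvComb r diffs) (List.range (diffs.length + 1))) = pvAllSubs diffs from rfl]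
  rw [pvXorL_perm ((pvAllSubs_perm diffs).map _)]
  rw [← pvA_main (fun s => pvSelect target.1 target.2 s) diffs state false]
  congr 1
  apply List.map_congr_left
  intro S _
  by_cases h : S.length % 2 = 1
  · simp [h, pvApplyDiff]
  · have : (S.length % 2 == 1) = false := by simpa using h
    simp [h, this]

-- B's port equals pvD
theorem pvB_eq (state : List Int × List Int × List Int) (target : String × Int)
    (diffs : List (String × Int × Int)) (rounds : Int) :
    higher_order_derivative_alt state target diffs rounds =
      pvD (fun s => pvSelect target.1 target.2 s) state diffs false := by
  unfold higher_order_derivative_alt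
  have h := pvB_main (fun s => pvSelect target.1 target.2 s) diffs
    [((state.1, state.2.1, state.2.2), 0)] (by intro e he; simp at he; simp [he])
  simp only [List.map_cons, List.map_nil] at h
  rw [show ((0 : Int) == 1) = false from rfl] at h
  rw [pvXorL_cons, pvXorL, List.foldl_nil, PySem.Int.bxor_zero] at h
  exact h

-- ===== VERDICT (by name: the statement is the Claim_ definition above) =====
theorem higher_order_derivative_spec : Claim_equal_higher_order_derivative := by
  intro state target diffs rounds _ _
  unfold Spec_higher_order_derivative
  rw [pvA_eq, pvB_eq]
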